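-- pv_equiv track=rewrite | github.com/RA-CONSULTING/aureon-trading | aureon/exchanges/unified_market_status_server.py | _day_allowed
-- ===== SOURCE A (Python) =====
-- def _day_allowed(day_name: str, allowed_days: str | None) -> bool:
--     raw = (allowed_days or "Sun").strip().lower()
--     if raw in {"*", "all", "daily", "everyday"}:
--         return True
--     names = ["mon", "tue", "wed", "thu", "fri", "sat", "sun"]
--     current = day_name[:3].lower()
--     for part in raw.replace(";", ",").split(","):
--         item = part.strip()
--         if not item:
--             continue
--         if item == current or item == day_name.lower():
--             return True
--         if "-" in item:
--             start_raw, end_raw = [piece.strip()[:3].lower() for piece in item.split("-", 1)]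
--             if start_raw in names and end_raw in names and current in names:
--                 start = names.index(start_raw)
--                 end = names.index(end_raw)
--                 now = names.index(current)
--                 if start <= end and start <= now <= end:
--                     return True
--                 if start > end and (now >= start or now <= end):
--                     return True
--     return False
-- ===== SOURCE B (Python) =====
-- def _day_allowed(day_name: str, allowed_days: str | None) -> bool:
--     raw = (allowed_days or "Sun").strip().lower()
--     if raw in {"*", "all", "daily", "everyday"}:
--         return True
--     names = ["mon", "tue", "wed", "thu", "fri", "sat", "sun"]
--     # Precompute: every literal token, and the set of weekday indices covered by ranges.
--     literals = set()
--     idxs = set()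
--     for part in raw.replace(";", ",").split(","):
--         item = part.strip()
--         if not item:
--             continue
--         literals.add(item)
--         if "-" in item:
--             start_raw, end_raw = [p.strip()[:3].lower() for p in item.split("-", 1)]
--             if start_raw in names and end_raw in names:
--                 s = names.index(start_raw)
--                 e = names.index(end_raw)
--                 if s <= e:
--                     idxs.update(range(s, e + 1))
--                 else:
--                     idxs.update(range(s, 7))
--                     idxs.update(range(0, e + 1))
--     current = day_name[:3].lower()
--     if current in literals or day_name.lower() in literals:
--         return True
--     return current in names and names.index(current) in idxs
-- ===== Notes on version B (the rewrite author's own statement) =====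
-- stated objective: alternative
-- what changed: A tests each comma/semicolon part against the current day as it goes and early-returns; B first compiles the spec into a set of literal tokens plus a set of weekday indices covered by ranges (expanding wraparound ranges explicitly), then decides by two membership tests at the end.
import Mathlib
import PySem

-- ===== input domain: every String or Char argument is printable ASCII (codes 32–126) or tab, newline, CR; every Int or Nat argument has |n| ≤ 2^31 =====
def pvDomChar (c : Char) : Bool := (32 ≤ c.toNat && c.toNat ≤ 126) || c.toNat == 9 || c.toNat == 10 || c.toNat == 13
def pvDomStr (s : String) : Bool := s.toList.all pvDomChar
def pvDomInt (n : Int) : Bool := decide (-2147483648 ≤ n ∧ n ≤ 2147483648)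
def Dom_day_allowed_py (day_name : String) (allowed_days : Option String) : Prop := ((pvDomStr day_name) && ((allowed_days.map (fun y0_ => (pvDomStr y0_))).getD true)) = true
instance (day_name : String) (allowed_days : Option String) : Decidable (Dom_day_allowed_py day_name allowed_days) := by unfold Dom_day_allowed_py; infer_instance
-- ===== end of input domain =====

-- B compiles the allowed-days spec into a literal-token set and a weekday-index set first,
-- then answers by membership tests (alternative decomposition; A compares per part with early return).


-- ===== PORT A =====
def pvNames : List String := ["mon", "tue", "wed", "thu", "fri", "sat", "sun"]

-- [piece.strip()[:3].lower() for piece in item.split("-", 1)]  (shared subexpression of both Pythons)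
def pvPieces (item : String) : List String :=
  ((PySem.Str.splitMax? item "-" 1).getD []).map
    (fun piece => PySem.Str.lower (PySem.Str.slice (PySem.Str.strip piece) none (some 3)))

def dayLoopA (current dlow : String) : List String → Bool
  | [] => false
  | part :: rest =>
    let item := PySem.Str.strip part
    if item = "" then dayLoopA current dlow rest
    else if item = current ∨ item = dlow then true
    else if PySem.Str.isIn "-" item then
      match pvPieces item with
      | [start_raw, end_raw] =>
        if start_raw ∈ pvNames ∧ end_raw ∈ pvNames ∧ current ∈ pvNames then
          let start := (PySem.List.index? pvNames start_raw).getD 0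
          let stop := (PySem.List.index? pvNames end_raw).getD 0
          let now := (PySem.List.index? pvNames current).getD 0
          if start ≤ stop ∧ start ≤ now ∧ now ≤ stop then true
          else if stop < start ∧ (start ≤ now ∨ now ≤ stop) then true
          else dayLoopA current dlow rest
        else dayLoopA current dlow rest
      | _ => dayLoopA current dlow rest
    else dayLoopA current dlow rest

def day_allowed_py (day_name : String) (allowed_days : Option String) : Bool :=
  let base := match allowed_days with
    | none => "Sun"
    | some s => if s = "" then "Sun" else s
  let raw := PySem.Str.lower (PySem.Str.strip base)
  if raw = "*" ∨ raw = "all" ∨ raw = "daily" ∨ raw = "everyday" then true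
  else
    let current := PySem.Str.lower (PySem.Str.slice day_name none (some 3))
    dayLoopA current (PySem.Str.lower day_name)
      ((PySem.Str.split? (PySem.Str.replace raw ";" ",") ",").getD [])

-- ===== PORT B =====
def dayCollectB : List String → PySem.Set String × PySem.Set Int → PySem.Set String × PySem.Set Int
  | [], acc => acc
  | part :: rest, acc =>
    let item := PySem.Str.strip part
    if item = "" then dayCollectB rest acc
    else
      let lits := PySem.Set.add acc.1 item
      let idxs :=
        if PySem.Str.isIn "-" item then
          match pvPieces item with
          | [start_raw, end_raw] =>
            if start_raw ∈ pvNames ∧ end_raw ∈ pvNames then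
              let s := (PySem.List.index? pvNames start_raw).getD 0
              let e := (PySem.List.index? pvNames end_raw).getD 0
              if s ≤ e then PySem.Set.update acc.2 (PySem.List.pyRange (s : Int) ((e : Int) + 1) 1)
              else PySem.Set.update (PySem.Set.update acc.2 (PySem.List.pyRange (s : Int) 7 1))
                     (PySem.List.pyRange 0 ((e : Int) + 1) 1)
            else acc.2
          | _ => acc.2
        else acc.2
      dayCollectB rest (lits, idxs)

def day_allowed_py_alt (day_name : String) (allowed_days : Option String) : Bool :=
  let base := match allowed_days with
    | none => "Sun"
    | some s => if s = "" then "Sun" else s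
  let raw := PySem.Str.lower (PySem.Str.strip base)
  if raw = "*" ∨ raw = "all" ∨ raw = "daily" ∨ raw = "everyday" then true
  else
    let acc := dayCollectB
      ((PySem.Str.split? (PySem.Str.replace raw ";" ",") ",").getD [])
      (PySem.Set.empty, PySem.Set.empty)
    let current := PySem.Str.lower (PySem.Str.slice day_name none (some 3))
    if PySem.Set.contains acc.1 current || PySem.Set.contains acc.1 (PySem.Str.lower day_name) then true
    else decide (current ∈ pvNames) &&
           PySem.Set.contains acc.2 (((PySem.List.index? pvNames current).getD 0 : Nat) : Int)

-- ===== PRECONDITION & SPEC =====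
def Spec_day_allowed_py (day_name : String) (allowed_days : Option String) (out : Bool) : Prop := out = day_allowed_py_alt day_name allowed_days
instance (day_name : String) (allowed_days : Option String) (out : Bool) : Decidable (Spec_day_allowed_py day_name allowed_days out) := by unfold Spec_day_allowed_py; infer_instance

-- ===== CLAIM (what is proved, stated in full; the proofs are below) =====
def Claim_equal_day_allowed_py : Prop := ∀ (day_name : String) (allowed_days : Option String), Dom_day_allowed_py day_name allowed_days → Spec_day_allowed_py day_name allowed_days (day_allowed_py day_name allowed_days)

-- ===== LEMMAS AND PROOFS =====

-- the final membership test B performs, as a function of the accumulator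
def pvChk (current dlow : String) (acc : PySem.Set String × PySem.Set Int) : Bool :=
  PySem.Set.contains acc.1 current || PySem.Set.contains acc.1 dlow ||
  (decide (current ∈ pvNames) &&
    PySem.Set.contains acc.2 (((PySem.List.index? pvNames current).getD 0 : Nat) : Int))

lemma pvIndex_lt_7 (s : String) (h : s ∈ pvNames) : (PySem.List.index? pvNames s).getD 0 < 7 := by
  simp only [pvNames, List.mem_cons, List.not_mem_nil, or_false] at h
  rcases h with h | h | h | h | h | h | h <;> subst h <;> decide

lemma if_true_or (p : Prop) [Decidable p] (b : Bool) : (if p then true else b) = (decide p || b) := by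
  by_cases h : p <;> simp [h]

lemma contains_add_eq (s : PySem.Set String) (x y : String) :
    PySem.Set.contains (PySem.Set.add s x) y = (PySem.Set.contains s y || decide (y = x)) := by
  rw [Bool.eq_iff_iff]
  simp [PySem.Set.mem_add]

lemma contains_update_eq (s : PySem.Set Int) (R : List Int) (x : Int) :
    PySem.Set.contains (PySem.Set.update s R) x = (PySem.Set.contains s x || decide (x ∈ R)) := by
  rw [Bool.eq_iff_iff]
  simp [PySem.Set.mem_update]

lemma decide_or_swap (item current dlow : String) :
    decide (item = current ∨ item = dlow) = (decide (current = item) || decide (dlow = item)) := by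
  by_cases h1 : item = current <;> by_cases h2 : item = dlow <;> simp [h1, h2, eq_comm]

lemma collect_loop (current dlow : String) (parts : List String) :
    ∀ acc, pvChk current dlow (dayCollectB parts acc)
      = (pvChk current dlow acc || dayLoopA current dlow parts) := by
  induction parts with
  | nil => intro acc; simp [dayCollectB, dayLoopA]
  | cons part rest ih =>
    intro acc
    simp only [dayCollectB, dayLoopA]
    by_cases h0 : PySem.Str.strip part = ""
    · simp only [if_pos h0, ih]
    · simp only [if_neg h0]
      generalize PySem.Str.strip part = item
      rw [ih, if_true_or]
      by_cases h2 : PySem.Str.isIn "-" item = true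
      · simp only [if_pos h2]
        rcases hp : pvPieces item with _ | ⟨a, _ | ⟨b, _ | ⟨c, t⟩⟩⟩ <;> simp only [hp]
        · simp only [pvChk, contains_add_eq]
          rw [decide_or_swap]
          simp only [Bool.or_assoc, Bool.or_comm, Bool.or_left_comm]
        · simp only [pvChk, contains_add_eq]
          rw [decide_or_swap]
          simp only [Bool.or_assoc, Bool.or_comm, Bool.or_left_comm]
        · -- the two-piece case
          by_cases hab : a ∈ pvNames ∧ b ∈ pvNames
          · by_cases hc : current ∈ pvNames
            · have hA : a ∈ pvNames ∧ b ∈ pvNames ∧ current ∈ pvNames := ⟨hab.1, hab.2, hc⟩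
              have hs := pvIndex_lt_7 a hab.1
              have he := pvIndex_lt_7 b hab.2
              have hn := pvIndex_lt_7 current hc
              simp only [if_pos hab, if_pos hA]
              by_cases hse : (PySem.List.index? pvNames a).getD 0 ≤ (PySem.List.index? pvNames b).getD 0
              · simp only [if_pos hse]
                rw [if_true_or, if_true_or]
                simp only [pvChk, contains_add_eq, contains_update_eq]
                rw [decide_or_swap]
                simp only [hc, decide_true, Bool.true_and]
                rw [show decide ((((PySem.List.index? pvNames current).getD 0 : Nat) : Int) ∈
                      PySem.List.pyRange ((((PySem.List.index? pvNames a).getD 0 : Nat)) : Int)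
                        ((((PySem.List.index? pvNames b).getD 0 : Nat) : Int) + 1) 1)
                    = decide ((PySem.List.index? pvNames a).getD 0 ≤ (PySem.List.index? pvNames b).getD 0 ∧
                        (PySem.List.index? pvNames a).getD 0 ≤ (PySem.List.index? pvNames current).getD 0 ∧
                        (PySem.List.index? pvNames current).getD 0 ≤ (PySem.List.index? pvNames b).getD 0) from by
                  rw [decide_eq_decide, PySem.List.mem_pyRange_one]; omega]
                rw [show decide ((PySem.List.index? pvNames b).getD 0 < (PySem.List.index? pvNames a).getD 0 ∧
                      ((PySem.List.index? pvNames a).getD 0 ≤ (PySem.List.index? pvNames current).getD 0 ∨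
                        (PySem.List.index? pvNames current).getD 0 ≤ (PySem.List.index? pvNames b).getD 0))
                    = false from by rw [decide_eq_false_iff_not]; omega]
                simp only [Bool.false_or, Bool.or_assoc, Bool.or_comm, Bool.or_left_comm]
              · simp only [if_neg hse]
                rw [if_true_or, if_true_or]
                simp only [pvChk, contains_add_eq, contains_update_eq]
                rw [decide_or_swap]
                simp only [hc, decide_true, Bool.true_and]
                rw [show decide ((PySem.List.index? pvNames a).getD 0 ≤ (PySem.List.index? pvNames b).getD 0 ∧
                        (PySem.List.index? pvNames a).getD 0 ≤ (PySem.List.index? pvNames current).getD 0 ∧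
                        (PySem.List.index? pvNames current).getD 0 ≤ (PySem.List.index? pvNames b).getD 0)
                    = false from by rw [decide_eq_false_iff_not]; omega]
                rw [show decide ((((PySem.List.index? pvNames current).getD 0 : Nat) : Int) ∈
                      PySem.List.pyRange ((((PySem.List.index? pvNames a).getD 0 : Nat)) : Int) 7 1)
                    = decide ((PySem.List.index? pvNames a).getD 0 ≤ (PySem.List.index? pvNames current).getD 0) from by
                  rw [decide_eq_decide, PySem.List.mem_pyRange_one]; omega]
                rw [show decide ((((PySem.List.index? pvNames current).getD 0 : Nat) : Int) ∈
                      PySem.List.pyRange 0 ((((PySem.List.index? pvNames b).getD 0 : Nat) : Int) + 1) 1)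
                    = decide ((PySem.List.index? pvNames current).getD 0 ≤ (PySem.List.index? pvNames b).getD 0) from by
                  rw [decide_eq_decide, PySem.List.mem_pyRange_one]; omega]
                rw [show decide ((PySem.List.index? pvNames b).getD 0 < (PySem.List.index? pvNames a).getD 0 ∧
                      ((PySem.List.index? pvNames a).getD 0 ≤ (PySem.List.index? pvNames current).getD 0 ∨
                        (PySem.List.index? pvNames current).getD 0 ≤ (PySem.List.index? pvNames b).getD 0))
                    = (decide ((PySem.List.index? pvNames a).getD 0 ≤ (PySem.List.index? pvNames current).getD 0) ||
                       decide ((PySem.List.index? pvNames current).getD 0 ≤ (PySem.List.index? pvNames b).getD 0)) from by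
                  rw [Bool.eq_iff_iff]
                  simp only [Bool.or_eq_true, decide_eq_true_eq]
                  omega]
                simp only [Bool.false_or, Bool.or_assoc, Bool.or_comm, Bool.or_left_comm]
            · have hA : ¬(a ∈ pvNames ∧ b ∈ pvNames ∧ current ∈ pvNames) := by tauto
              simp only [if_pos hab, if_neg hA]
              simp only [pvChk, contains_add_eq]
              rw [decide_or_swap]
              simp only [hc, decide_false, Bool.false_and, Bool.false_or,
                Bool.or_assoc, Bool.or_comm, Bool.or_left_comm]
          · have hA : ¬(a ∈ pvNames ∧ b ∈ pvNames ∧ current ∈ pvNames) := by tauto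
            simp only [if_neg hab, if_neg hA]
            simp only [pvChk, contains_add_eq]
            rw [decide_or_swap]
            simp only [Bool.or_assoc, Bool.or_comm, Bool.or_left_comm]
        · simp only [pvChk, contains_add_eq]
          rw [decide_or_swap]
          simp only [Bool.or_assoc, Bool.or_comm, Bool.or_left_comm]
      · simp only [if_neg h2]
        simp only [pvChk, contains_add_eq]
        rw [decide_or_swap]
        simp only [Bool.or_assoc, Bool.or_comm, Bool.or_left_comm]

lemma branch_eq (current dlow : String) (parts : List String) :
    dayLoopA current dlow parts =
      (if PySem.Set.contains (dayCollectB parts (PySem.Set.empty, PySem.Set.empty)).1 current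
          || PySem.Set.contains (dayCollectB parts (PySem.Set.empty, PySem.Set.empty)).1 dlow then true
       else decide (current ∈ pvNames) &&
         PySem.Set.contains (dayCollectB parts (PySem.Set.empty, PySem.Set.empty)).2
           (((PySem.List.index? pvNames current).getD 0 : Nat) : Int)) := by
  have h := collect_loop current dlow parts (PySem.Set.empty, PySem.Set.empty)
  simp only [pvChk, PySem.Set.empty, PySem.Set.contains_eq_listContains, List.contains_nil,
    Bool.false_or, Bool.and_false, Bool.or_false] at h
  rw [← h]
  cases hx : (dayCollectB parts ([], [])).1.contains current <;>
    cases hy : (dayCollectB parts ([], [])).1.contains dlow <;>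
    simp [PySem.Set.contains_eq_listContains]

theorem day_allowed_py_spec : Claim_equal_day_allowed_py := by
  intro day_name allowed_days _
  unfold Spec_day_allowed_py day_allowed_py day_allowed_py_alt
  cases allowed_days with
  | none =>
    dsimp only
    split
    · rfl
    · exact branch_eq _ _ _
  | some s =>
    dsimp only
    by_cases hw : PySem.Str.lower (PySem.Str.strip (if s = "" then "Sun" else s)) = "*" ∨
        PySem.Str.lower (PySem.Str.strip (if s = "" then "Sun" else s)) = "all" ∨
        PySem.Str.lower (PySem.Str.strip (if s = "" then "Sun" else s)) = "daily" ∨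
        PySem.Str.lower (PySem.Str.strip (if s = "" then "Sun" else s)) = "everyday"
    · rw [if_pos hw, if_pos hw]
    · rw [if_neg hw, if_neg hw]
      exact branch_eq _ _ _
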